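-- pv_equiv track=rewrite | github.com/amusamih/agentic-meio | scripts/run_stockpyl_serial.py | _single_prompt_hash
-- ===== SOURCE A (Python) =====
-- def _single_prompt_hash(values: tuple[str | None, ...]) -> str | None:
--     normalized = tuple(value for value in values if value is not None)
--     if not normalized:
--         return None
--     unique_values = sorted(set(normalized))
--     if len(unique_values) == 1:
--         return unique_values[0]
--     return None
-- ===== SOURCE B (Python) =====
-- def _single_prompt_hash(values):
--     first = None
--     for value in values:
--         if value is None:
--             continue
--         if first is None:
--             first = value
--         elif value != first:
--             return None
--     return first
-- ===== Notes on version B (the rewrite author's own statement) =====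
-- stated objective: faster
-- what changed: Replaces build-set-then-sort-then-inspect with a single early-exit pass that keeps one candidate value and returns None as soon as a second distinct non-None value appears.
import Mathlib
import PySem

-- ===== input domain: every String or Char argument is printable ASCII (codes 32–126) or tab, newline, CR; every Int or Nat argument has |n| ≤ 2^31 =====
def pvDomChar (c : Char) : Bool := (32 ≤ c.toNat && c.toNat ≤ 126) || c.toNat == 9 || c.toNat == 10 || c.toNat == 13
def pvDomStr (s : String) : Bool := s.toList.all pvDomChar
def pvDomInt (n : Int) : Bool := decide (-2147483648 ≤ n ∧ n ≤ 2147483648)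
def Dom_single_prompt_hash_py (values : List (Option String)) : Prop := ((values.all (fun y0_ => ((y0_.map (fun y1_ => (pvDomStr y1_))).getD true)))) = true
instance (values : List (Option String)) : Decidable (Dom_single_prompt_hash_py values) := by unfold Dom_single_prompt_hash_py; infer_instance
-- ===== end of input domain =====

-- B replaces A's build-set/sort/inspect with a single early-exit pass keeping one candidate; return values are identical (objective: simpler).

-- ===== PORT A =====
def single_prompt_hash_py (values : List (Option String)) : Option String :=
  let normalized := values.filterMap id
  if normalized = [] then none
  else
    let unique_values := PySem.List.sorted (PySem.Set.ofList normalized) (fun x => x) false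
    if unique_values.length = 1 then PySem.List.pyGet? unique_values 0
    else none

-- ===== PORT B =====
-- the for-loop of Source B: 'first' is the accumulator; a differing value exits early with none
def spHashGo : List (Option String) → Option String → Option String
  | [], first => first
  | none :: t, first => spHashGo t first
  | some v :: t, none => spHashGo t (some v)
  | some v :: t, some f => if v = f then spHashGo t (some f) else none

def single_prompt_hash_py_alt (values : List (Option String)) : Option String :=
  spHashGo values none

-- ===== PRECONDITION & SPEC =====
def Spec_single_prompt_hash_py (values : List (Option String)) (out : Option String) : Prop := out = single_prompt_hash_py_alt values
instance (values : List (Option String)) (out : Option String) : Decidable (Spec_single_prompt_hash_py values out) := by unfold Spec_single_prompt_hash_py; infer_instance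

-- ===== CLAIM (what is proved, stated in full; the proofs are below) =====
def Claim_equal_single_prompt_hash_py : Prop := ∀ (values : List (Option String)), Dom_single_prompt_hash_py values → Spec_single_prompt_hash_py values (single_prompt_hash_py values)

-- ===== LEMMAS AND PROOFS =====

-- reference scan over the non-None values only
def spGo' (t : List String) (x : String) : Option String :=
  match t with
  | [] => some x
  | y :: t => if y = x then spGo' t x else none

theorem spGo'_char (t : List String) (x : String) :
    spGo' t x = if ∀ y ∈ t, y = x then some x else none := by
  induction t with
  | nil => simp [spGo']
  | cons y t ih =>
    simp only [spGo']
    by_cases h : y = x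
    · subst h
      rw [ih]
      by_cases h2 : ∀ z ∈ t, z = y <;> simp [h2]
    · simp [h]

theorem spHashGo_some (values : List (Option String)) (f : String) :
    spHashGo values (some f) = spGo' (values.filterMap id) f := by
  induction values generalizing f with
  | nil => simp [spHashGo, spGo']
  | cons v t ih =>
    cases v with
    | none => simpa [spHashGo] using ih f
    | some v =>
      simp only [spHashGo, List.filterMap_cons, id, spGo']
      by_cases h : v = f <;> simp [h, ih]

theorem spHashGo_none (values : List (Option String)) :
    single_prompt_hash_py_alt values =
      match values.filterMap id with
      | [] => none
      | x :: t => spGo' t x := by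
  unfold single_prompt_hash_py_alt
  induction values with
  | nil => simp [spHashGo]
  | cons v t ih =>
    cases v with
    | none => simpa [spHashGo] using ih
    | some v => simp [spHashGo, spHashGo_some]

theorem spSet_all_eq (t : List String) (x : String) (h : ∀ y ∈ t, y = x) :
    PySem.Set.ofList (x :: t) = [x] := by
  rw [PySem.Set.ofList_eq_foldl]
  have hx : PySem.Set.add [] x = [x] := by simp [PySem.Set.add, PySem.Set.contains]
  have : ∀ (t : List String), (∀ y ∈ t, y = x) → t.foldl PySem.Set.add [x] = [x] := by
    intro t
    induction t with
    | nil => simp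
    | cons y t ih =>
      intro h
      have hy : y = x := h y (by simp)
      subst hy
      have : PySem.Set.add [y] y = [y] := by simp [PySem.Set.add, PySem.Set.contains]
      simpa [this] using ih (fun z hz => h z (by simp [hz]))
  simpa [hx] using this t h

theorem spA_char (values : List (Option String)) :
    single_prompt_hash_py values =
      match values.filterMap id with
      | [] => none
      | x :: t => if ∀ y ∈ t, y = x then some x else none := by
  unfold single_prompt_hash_py
  cases hn : values.filterMap id with
  | nil => simp
  | cons x t =>
    simp only []
    by_cases h : ∀ y ∈ t, y = x
    · rw [spSet_all_eq t x h]
      have hs : (PySem.List.sorted [x] (fun y => y)) = [x] := by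
        apply PySem.List.sorted_eq_self_of_pairwise
        simp
      simp [hs, PySem.List.pyGet?, PySem.List.pyIdx?]
      exact h
    · rw [not_forall] at h
      simp only [not_forall, exists_prop] at h
      obtain ⟨y, hy, hyx⟩ := h
      have hlen : (PySem.Set.ofList (x :: t)).length ≠ 1 := by
        intro h1
        obtain ⟨z, hz⟩ := List.length_eq_one_iff.mp h1
        have hx : x ∈ PySem.Set.ofList (x :: t) := (PySem.Set.mem_ofList _ _).mpr (by simp)
        have hy' : y ∈ PySem.Set.ofList (x :: t) := (PySem.Set.mem_ofList _ _).mpr (by simp [hy])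
        rw [hz] at hx hy'
        simp at hx hy'
        exact hyx (hy'.trans hx.symm)
      have hr : ¬ ∀ z ∈ t, z = x := fun h' => hyx (h' y hy)
      simp [PySem.List.length_sorted, hlen, hr]

-- ===== VERDICT (by name: the statement is the Claim_ definition above) =====
theorem single_prompt_hash_py_spec : Claim_equal_single_prompt_hash_py := by
  intro values _
  unfold Spec_single_prompt_hash_py
  rw [spA_char, spHashGo_none]
  cases values.filterMap id with
  | nil => rfl
  | cons x t => simp [spGo'_char]
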